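-- pv_equiv track=rewrite | github.com/RishavAr/Enough-Thinking | src/enough_thinking/mcp/agent_client.py | compute_overlaps
-- ===== SOURCE A (Python) =====
-- def compute_overlaps(events):
--     overlaps = []
--     for i in range(len(events)):
--         for j in range(i+1, len(events)):
--             a = events[i]; b = events[j]
--             if a[1] < b[2] and b[1] < a[2]:
--                 overlaps.append((a[0], b[0]))
--     return overlaps
-- ===== SOURCE B (Python) =====
-- def compute_overlaps(events):
--     n = len(events)
--     order = sorted(range(n), key=lambda i: events[i][1])
--     active = []
--     pairs = []
--     for j in order:
--         s, e = events[j][1], events[j][2]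
--         active = [i for i in active if events[i][2] > s]
--         for i in active:
--             if events[i][1] < e:
--                 pairs.append((i, j) if i < j else (j, i))
--         active.append(j)
--     pairs.sort()
--     return [(events[i][0], events[j][0]) for i, j in pairs]
-- ===== Notes on version B (the rewrite author's own statement) =====
-- stated objective: alternative
-- what changed: Replaces A's all-pairs double loop by a sort-by-start sweep line with an active set, then sorts the collected index pairs to restore A's lexicographic output order; it trades A's unconditional O(n^2) scan for sorting plus active-set maintenance, which was not measurably faster on a timing run's timing family.
import Mathlib
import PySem

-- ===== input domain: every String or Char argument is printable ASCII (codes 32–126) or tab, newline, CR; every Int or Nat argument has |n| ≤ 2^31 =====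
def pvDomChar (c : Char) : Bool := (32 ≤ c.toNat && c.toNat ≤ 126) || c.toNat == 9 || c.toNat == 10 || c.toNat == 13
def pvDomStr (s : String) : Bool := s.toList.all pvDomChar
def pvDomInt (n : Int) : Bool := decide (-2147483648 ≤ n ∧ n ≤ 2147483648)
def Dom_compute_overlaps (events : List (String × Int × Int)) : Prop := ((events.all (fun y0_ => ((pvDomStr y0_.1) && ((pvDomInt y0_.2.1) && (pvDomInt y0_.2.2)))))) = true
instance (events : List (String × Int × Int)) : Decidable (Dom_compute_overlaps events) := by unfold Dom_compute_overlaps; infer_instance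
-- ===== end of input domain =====

-- B replaces A's all-pairs double loop by a sort-by-start sweep line with an active set,
-- sorting the collected index pairs to restore A's (i, j)-lexicographic output order (objective: alternative).

-- ===== PORT A =====
def compute_overlaps (events : List (String × Int × Int)) : List (String × String) :=
  (PySem.List.pyRange 0 (events.length : Int)).foldl (fun overlaps i =>
    (PySem.List.pyRange (i + 1) (events.length : Int)).foldl (fun overlaps j =>
      let a := PySem.List.pyGetD events i ("", 0, 0)   -- i, j always in range: 0 ≤ i < j < len(events)
      let b := PySem.List.pyGetD events j ("", 0, 0)
      if a.2.1 < b.2.2 ∧ b.2.1 < a.2.2 then overlaps ++ [(a.1, b.1)] else overlaps)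
      overlaps) []

-- ===== PORT B =====
-- events[i] for a Nat index i < len(events) (B only indexes with indices from range(n))
def evGet (events : List (String × Int × Int)) (i : Nat) : String × Int × Int :=
  events.getD i ("", 0, 0)

-- body of B's `for j in order:` loop; state = (active, pairs)
def sweepStep (events : List (String × Int × Int)) (st : List Nat × List (Nat × Nat)) (j : Nat) :
    List Nat × List (Nat × Nat) :=
  let s := (evGet events j).2.1
  let e := (evGet events j).2.2
  let active := st.1.filter (fun i => decide (s < (evGet events i).2.2))
  let pairs := active.foldl (fun ps i =>
    if (evGet events i).2.1 < e then ps ++ [if i < j then (i, j) else (j, i)] else ps) st.2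
  (active ++ [j], pairs)

def compute_overlaps_alt (events : List (String × Int × Int)) : List (String × String) :=
  let n := events.length
  let order := PySem.List.sorted (List.range n) (fun i => (evGet events i).2.1) false
  let st := order.foldl (sweepStep events) ([], [])
  let pairs := PySem.List.sorted2 st.2 (fun p => p.1) (fun p => p.2) false
  pairs.map (fun p => ((evGet events p.1).1, (evGet events p.2).1))

-- ===== PRECONDITION & SPEC =====
def Spec_compute_overlaps (events : List (String × Int × Int)) (out : List (String × String)) : Prop := out = compute_overlaps_alt events
instance (events : List (String × Int × Int)) (out : List (String × String)) : Decidable (Spec_compute_overlaps events out) := by unfold Spec_compute_overlaps; infer_instance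

-- ===== CLAIM (what is proved, stated in full; the proofs are below) =====
def Claim_equal_compute_overlaps : Prop := ∀ (events : List (String × Int × Int)), Dom_compute_overlaps events → Spec_compute_overlaps events (compute_overlaps events)

-- ===== LEMMAS AND PROOFS =====

-- `events[i]` and `events[j]` overlap (A's and B's shared test)
def olapB (events : List (String × Int × Int)) (i j : Nat) : Bool :=
  decide ((evGet events i).2.1 < (evGet events j).2.2 ∧ (evGet events j).2.1 < (evGet events i).2.2)

-- all (i, j) with i, j < n, in lexicographic order
def allPairs (n : Nat) : List (Nat × Nat) :=
  (List.range n).flatMap (fun i => (List.range n).map (fun j => (i, j)))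

-- the overlapping pairs i < j < n, in lexicographic order: the common normal form of both programs
def lexOverlaps (events : List (String × Int × Int)) : List (Nat × Nat) :=
  (allPairs events.length).filter (fun p => olapB events p.1 p.2 && decide (p.1 < p.2))

def outMap (events : List (String × Int × Int)) (p : Nat × Nat) : String × String :=
  ((evGet events p.1).1, (evGet events p.2).1)

lemma olapB_symm (events : List (String × Int × Int)) (i j : Nat) :
    olapB events i j = olapB events j i := by
  simp [olapB, and_comm]

lemma mem_allPairs (n : Nat) (p : Nat × Nat) : p ∈ allPairs n ↔ p.1 < n ∧ p.2 < n := by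
  simp only [allPairs, List.mem_flatMap, List.mem_map, List.mem_range]
  constructor
  · rintro ⟨i, hi, j, hj, rfl⟩; exact ⟨hi, hj⟩
  · rintro ⟨h1, h2⟩; exact ⟨p.1, h1, p.2, h2, rfl⟩

lemma mem_lexOverlaps (events : List (String × Int × Int)) (p : Nat × Nat) :
    p ∈ lexOverlaps events ↔ p.1 < p.2 ∧ p.2 < events.length ∧ olapB events p.1 p.2 = true := by
  simp only [lexOverlaps, List.mem_filter, mem_allPairs, Bool.and_eq_true, decide_eq_true_eq]
  constructor
  · rintro ⟨⟨h1, h2⟩, h3, h4⟩; exact ⟨h4, h2, h3⟩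
  · rintro ⟨h1, h2, h3⟩; exact ⟨⟨by omega, h2⟩, h3, h1⟩

-- allPairs is strictly increasing under the flattening key p.1 * n + p.2
lemma pairwise_allPairs (n : Nat) :
    (allPairs n).Pairwise (fun p q => p.1 * n + p.2 < q.1 * n + q.2) := by
  unfold allPairs
  rw [List.pairwise_flatMap]
  constructor
  · intro i _
    rw [List.pairwise_map]
    refine List.pairwise_lt_range.imp ?_
    intro a b h
    simp only
    omega
  · refine List.pairwise_lt_range.imp ?_
    intro i i' hii' x hx y hy
    simp only [List.mem_map, List.mem_range] at hx hy
    obtain ⟨j, hj, rfl⟩ := hx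
    obtain ⟨j', hj', rfl⟩ := hy
    have h1 : (i + 1) * n ≤ i' * n := Nat.mul_le_mul_right n (by omega)
    have h2 : (i + 1) * n = i * n + n := by ring
    simp only
    omega

lemma pairwise_lexOverlaps (events : List (String × Int × Int)) :
    (lexOverlaps events).Pairwise
      (fun p q => p.1 * events.length + p.2 < q.1 * events.length + q.2) := by
  exact List.Pairwise.sublist List.filter_sublist (pairwise_allPairs events.length)

lemma nodup_lexOverlaps (events : List (String × Int × Int)) : (lexOverlaps events).Nodup := by
  refine (pairwise_lexOverlaps events).imp ?_
  intro p q h hpq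
  subst hpq
  omega

-- ===== A = map outMap lexOverlaps =====

lemma filter_range_lt (n i : Nat) :
    (List.range n).filter (fun j => decide (i < j))
      = (List.range (n - (i + 1))).map (fun k => i + 1 + k) := by
  induction n with
  | zero => simp
  | succ n ih =>
    rw [List.range_succ, List.filter_append, ih]
    by_cases h : i < n
    · have h2 : n + 1 - (i + 1) = (n - (i + 1)) + 1 := by omega
      rw [h2, List.range_succ, List.map_append]
      have h3 : i + 1 + (n - (i + 1)) = n := by omega
      simp [h, h3]
    · have h2 : n + 1 - (i + 1) = 0 := by omega
      have h3 : n - (i + 1) = 0 := by omega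
      simp [h, h2, h3]

lemma compute_overlaps_eq (events : List (String × Int × Int)) :
    compute_overlaps events = (lexOverlaps events).map (outMap events) := by
  have hinner : ∀ (i : Nat) (ov : List (String × String)),
      (PySem.List.pyRange ((i : Int) + 1) (events.length : Int)).foldl
        (fun overlaps j =>
          let a := PySem.List.pyGetD events (i : Int) ("", 0, 0)
          let b := PySem.List.pyGetD events j ("", 0, 0)
          if a.2.1 < b.2.2 ∧ b.2.1 < a.2.2 then overlaps ++ [(a.1, b.1)] else overlaps) ov
      = ov ++ ((List.range events.length).filter
            (fun j => olapB events i j && decide (i < j))).map (fun j => outMap events (i, j)) := by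
    intro i ov
    have hc : ((i : Int) + 1) = ((i + 1 : Nat) : Int) := by push_cast; ring
    rw [hc, PySem.List.pyRange_one]
    have ht : ((events.length : Int) - ((i + 1 : Nat) : Int)).toNat = events.length - (i + 1) := by
      omega
    rw [ht, List.foldl_map]
    refine (PySem.List.foldl_congr_mem _ _
        (fun (overlaps : List (String × String)) (k : Nat) =>
          if olapB events i (i + 1 + k) = true then overlaps ++ [outMap events (i, i + 1 + k)]
          else overlaps) ov ?_).trans ?_
    · intro acc k _
      have hck : ((i + 1 : Nat) : Int) + (k : Int) = ((i + 1 + k : Nat) : Int) := by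
        push_cast; ring
      simp only [hck, PySem.List.pyGetD_natCast]
      simp [olapB, evGet, outMap]
    · rw [PySem.List.foldl_append_if (fun k => olapB events i (i + 1 + k))
          (fun k => outMap events (i, i + 1 + k))]
      have hR : ((List.range events.length).filter
            (fun j => olapB events i j && decide (i < j))).map (fun j => outMap events (i, j))
          = ((List.range (events.length - (i + 1))).filter
              (fun k => olapB events i (i + 1 + k))).map (fun k => outMap events (i, i + 1 + k)) := by
        rw [← List.filter_filter, filter_range_lt, List.filter_map, List.map_map]
        rfl
      rw [hR]
  unfold compute_overlaps
  rw [PySem.List.pyRange_zero_natCast, List.foldl_map]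
  refine (PySem.List.foldl_congr_mem _ _
      (fun (ov : List (String × String)) (i : Nat) =>
        ov ++ ((List.range events.length).filter
          (fun j => olapB events i j && decide (i < j))).map (fun j => outMap events (i, j)))
      [] ?_).trans ?_
  · intro acc i _
    exact hinner i acc
  · rw [PySem.List.foldl_append_eq_flatMap]
    unfold lexOverlaps allPairs
    rw [List.filter_flatMap, List.map_flatMap]
    simp only [List.nil_append, List.filter_map, List.map_map]
    rfl

-- ===== the sweep =====

-- invariant-carrying induction over the remainder of `order`
lemma sweep_invariant (events : List (String × Int × Int)) (l done : List Nat)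
    (active : List Nat) (pairs : List (Nat × Nat))
    (hsorted : (done ++ l).Pairwise (fun a b => (evGet events a).2.1 ≤ (evGet events b).2.1))
    (hnodup : (done ++ l).Nodup)
    (hactD : ∀ i ∈ active, i ∈ done)
    (hactF : ∀ i, ∀ s : Int, i ∈ done → (∀ p ∈ done, (evGet events p).2.1 ≤ s) →
      s < (evGet events i).2.2 → i ∈ active)
    (hactN : active.Nodup)
    (hpair : ∀ p : Nat × Nat, p ∈ pairs ↔
      p.1 < p.2 ∧ p.1 ∈ done ∧ p.2 ∈ done ∧ olapB events p.1 p.2 = true)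
    (hpairN : pairs.Nodup) :
    (∀ p : Nat × Nat, p ∈ (l.foldl (sweepStep events) (active, pairs)).2 ↔
      p.1 < p.2 ∧ p.1 ∈ done ++ l ∧ p.2 ∈ done ++ l ∧ olapB events p.1 p.2 = true) ∧
    (l.foldl (sweepStep events) (active, pairs)).2.Nodup := by
  induction l generalizing done active pairs with
  | nil =>
    refine ⟨fun p => ?_, hpairN⟩
    simpa using hpair p
  | cons j rest ih =>
    have hjdone : j ∉ done := by
      rw [List.nodup_append] at hnodup
      exact fun h => hnodup.2.2 j h j (by simp) rfl
    have hdone_le : ∀ p ∈ done, (evGet events p).2.1 ≤ (evGet events j).2.1 := by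
      rw [List.pairwise_append] at hsorted
      exact fun p hp => hsorted.2.2 p hp j (by simp)
    -- the filtered active set and the freshly recorded pairs
    have hstep : sweepStep events (active, pairs) j =
        (active.filter (fun i => decide ((evGet events j).2.1 < (evGet events i).2.2)) ++ [j],
         pairs ++ ((active.filter
              (fun i => decide ((evGet events j).2.1 < (evGet events i).2.2))).filter
            (fun i => decide ((evGet events i).2.1 < (evGet events j).2.2))).map
            (fun i => if i < j then (i, j) else (j, i))) := by
      unfold sweepStep
      dsimp only
      refine congrArg _ ?_
      refine (PySem.List.foldl_congr_mem _ _
        (fun ps i => if decide ((evGet events i).2.1 < (evGet events j).2.2) = true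
          then ps ++ [if i < j then (i, j) else (j, i)] else ps) pairs ?_).trans ?_
      · intro acc i _; simp
      · rw [PySem.List.foldl_append_if]
    have hiff : ∀ i : Nat,
        (i ∈ active.filter (fun i => decide ((evGet events j).2.1 < (evGet events i).2.2)) ∧
          (evGet events i).2.1 < (evGet events j).2.2) ↔
        (i ∈ done ∧ olapB events i j = true) := by
      intro i
      constructor
      · rintro ⟨hi, hlt⟩
        rw [List.mem_filter, decide_eq_true_eq] at hi
        exact ⟨hactD i hi.1, by simp [olapB]; exact ⟨hlt, hi.2⟩⟩
      · rintro ⟨hi, holap⟩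
        simp only [olapB, decide_eq_true_eq] at holap
        have hia : i ∈ active := hactF i (evGet events j).2.1 hi hdone_le holap.2
        exact ⟨by rw [List.mem_filter, decide_eq_true_eq]; exact ⟨hia, holap.2⟩, holap.1⟩
    have hAfilter : ∀ i,
        i ∈ (active.filter (fun i => decide ((evGet events j).2.1 < (evGet events i).2.2))).filter
            (fun i => decide ((evGet events i).2.1 < (evGet events j).2.2)) ↔
        (i ∈ done ∧ olapB events i j = true) := by
      intro i
      rw [List.mem_filter, decide_eq_true_eq]
      exact hiff i
    simp only [List.foldl_cons, hstep]
    have hmain := ih (done ++ [j])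
      (active.filter (fun i => decide ((evGet events j).2.1 < (evGet events i).2.2)) ++ [j])
      (pairs ++ ((active.filter
          (fun i => decide ((evGet events j).2.1 < (evGet events i).2.2))).filter
        (fun i => decide ((evGet events i).2.1 < (evGet events j).2.2))).map
        (fun i => if i < j then (i, j) else (j, i)))
      (by simpa using hsorted) (by simpa using hnodup)
      ?_ ?_ ?_ ?_ ?_
    · refine ⟨fun p => ?_, hmain.2⟩
      rw [hmain.1 p]
      simp
    -- hactD'
    · intro i hi
      rcases List.mem_append.1 hi with hi | hi
      · rw [List.mem_filter] at hi
        exact List.mem_append.2 (Or.inl (hactD i hi.1))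
      · exact List.mem_append.2 (Or.inr hi)
    -- hactF'
    · intro i s' hi hub hlt
      rcases List.mem_append.1 hi with hi | hi
      · have hjs : (evGet events j).2.1 ≤ s' := hub j (by simp)
        have hia : i ∈ active := hactF i s' hi (fun p hp => hub p (by simp [hp])) hlt
        refine List.mem_append.2 (Or.inl ?_)
        rw [List.mem_filter, decide_eq_true_eq]
        exact ⟨hia, by omega⟩
      · exact List.mem_append.2 (Or.inr hi)
    -- hactN'
    · rw [List.nodup_append]
      refine ⟨hactN.filter _, by simp, ?_⟩
      intro a ha b hb
      rw [List.mem_filter] at ha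
      have hb' : b = j := by simpa using hb
      subst hb'
      exact fun h => hjdone (h ▸ hactD a ha.1)
    -- hpair'
    · intro p
      rw [List.mem_append]
      constructor
      · rintro (hp | hp)
        · have h := (hpair p).1 hp
          exact ⟨h.1, by simp [h.2.1], by simp [h.2.2.1], h.2.2.2⟩
        · rw [List.mem_map] at hp
          obtain ⟨i, hi, rfl⟩ := hp
          have hid := (hAfilter i).1 hi
          have hij : i ≠ j := fun h => hjdone (h ▸ hid.1)
          by_cases hlt : i < j
          · rw [if_pos hlt]
            exact ⟨hlt, by simp [hid.1], by simp, hid.2⟩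
          · have hji : j < i := by omega
            rw [if_neg hlt]
            refine ⟨hji, by simp, by simp [hid.1], ?_⟩
            rw [olapB_symm]
            exact hid.2
      · rintro ⟨h12, hp1, hp2, holap⟩
        rcases List.mem_append.1 hp1 with hp1 | hp1 <;>
          rcases List.mem_append.1 hp2 with hp2 | hp2
        · exact Or.inl ((hpair p).2 ⟨h12, hp1, hp2, holap⟩)
        · simp only [List.mem_singleton] at hp2
          refine Or.inr ?_
          rw [List.mem_map]
          refine ⟨p.1, (hAfilter p.1).2 ⟨hp1, by rw [← hp2]; exact holap⟩, ?_⟩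
          have hlt : p.1 < j := hp2 ▸ h12
          rw [if_pos hlt, ← hp2]
        · simp only [List.mem_singleton] at hp1
          refine Or.inr ?_
          rw [List.mem_map]
          refine ⟨p.2, (hAfilter p.2).2 ⟨hp2, by rw [olapB_symm, ← hp1]; exact holap⟩, ?_⟩
          have hnlt : ¬ (p.2 < j) := by omega
          rw [if_neg hnlt, ← hp1]
        · simp only [List.mem_singleton] at hp1 hp2
          omega
    -- hpairN'
    · rw [List.nodup_append]
      refine ⟨hpairN, ?_, ?_⟩
      · refine List.Nodup.map_on ?_ ((hactN.filter _).filter _)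
        intro x hx y hy hxy
        have hxd := (hAfilter x).1 hx
        have hyd := (hAfilter y).1 hy
        have hxj : x ≠ j := fun h => hjdone (h ▸ hxd.1)
        have hyj : y ≠ j := fun h => hjdone (h ▸ hyd.1)
        rcases Nat.lt_or_ge x j with h1 | h1 <;> rcases Nat.lt_or_ge y j with h2 | h2
        · rw [if_pos h1, if_pos h2] at hxy
          simp only [Prod.mk.injEq] at hxy
          omega
        · rw [if_pos h1, if_neg (by omega : ¬ y < j)] at hxy
          simp only [Prod.mk.injEq] at hxy
          omega
        · rw [if_neg (by omega : ¬ x < j), if_pos h2] at hxy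
          simp only [Prod.mk.injEq] at hxy
          omega
        · rw [if_neg (by omega : ¬ x < j), if_neg (by omega : ¬ y < j)] at hxy
          simp only [Prod.mk.injEq] at hxy
          omega
      · intro q hq q2 hq2
        rw [List.mem_map] at hq2
        obtain ⟨i, hi, rfl⟩ := hq2
        intro heq
        rw [heq] at hq
        have h := (hpair _).1 hq
        by_cases hlt : i < j
        · rw [if_pos hlt] at h
          exact hjdone h.2.2.1
        · rw [if_neg hlt] at h
          exact hjdone h.2.1

lemma sweep_result (events : List (String × Int × Int)) :
    (∀ p : Nat × Nat,
      p ∈ ((PySem.List.sorted (List.range events.length)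
              (fun i => (evGet events i).2.1) false).foldl (sweepStep events) ([], [])).2 ↔
      p.1 < p.2 ∧ p.1 < events.length ∧ p.2 < events.length ∧ olapB events p.1 p.2 = true) ∧
    ((PySem.List.sorted (List.range events.length)
        (fun i => (evGet events i).2.1) false).foldl (sweepStep events) ([], [])).2.Nodup := by
  have hperm := PySem.List.sorted_perm (List.range events.length)
    (fun i => (evGet events i).2.1) false
  have hs1 : ([] ++ PySem.List.sorted (List.range events.length)
      (fun i => (evGet events i).2.1) false).Pairwise
      (fun a b => (evGet events a).2.1 ≤ (evGet events b).2.1) := by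
    simpa using PySem.List.sorted_pairwise (List.range events.length)
      (fun i => (evGet events i).2.1)
  have hs2 : ([] ++ PySem.List.sorted (List.range events.length)
      (fun i => (evGet events i).2.1) false).Nodup := by
    simpa using hperm.nodup_iff.mpr (List.nodup_range)
  have h := sweep_invariant events
    (PySem.List.sorted (List.range events.length) (fun i => (evGet events i).2.1) false)
    [] [] [] hs1 hs2
    (by simp) (by simp) (by simp) (by simp) (by simp)
  refine ⟨fun p => ?_, h.2⟩
  rw [h.1 p]
  simp only [List.nil_append]
  rw [hperm.mem_iff, hperm.mem_iff, List.mem_range, List.mem_range]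

-- ===== pairs.sort() = lexOverlaps =====

lemma insertBy_congr {α : Type} (b1 b2 : α → α → Bool) (x : α) (ys : List α)
    (h : ∀ y ∈ ys, b1 x y = b2 x y) :
    PySem.List.insertBy b1 x ys = PySem.List.insertBy b2 x ys := by
  induction ys with
  | nil => rfl
  | cons y ys ih =>
    have hy := h y (by simp)
    simp only [PySem.List.insertBy, hy]
    split
    · rfl
    · rw [ih (fun z hz => h z (by simp [hz]))]

lemma foldl_insertBy_congr {α : Type} (b1 b2 : α → α → Bool) (xs acc : List α)
    (hacc : ∀ a ∈ acc, ∀ x ∈ xs, b1 x a = b2 x a)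
    (hxs : ∀ a ∈ xs, ∀ x ∈ xs, b1 x a = b2 x a) :
    xs.foldl (fun acc x => PySem.List.insertBy b1 x acc) acc
      = xs.foldl (fun acc x => PySem.List.insertBy b2 x acc) acc := by
  induction xs generalizing acc with
  | nil => rfl
  | cons x xs ih =>
    simp only [List.foldl_cons]
    rw [insertBy_congr b1 b2 x acc (fun y hy => hacc y hy x (by simp))]
    refine ih (PySem.List.insertBy b2 x acc) ?_ ?_
    · intro a ha z hz
      rcases (PySem.List.mem_insertBy b2 x a acc).1 ha with h | h
      · subst h; exact hxs a (by simp) z (by simp [hz])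
      · exact hacc a h z (by simp [hz])
    · intro a ha z hz
      exact hxs a (by simp [ha]) z (by simp [hz])

-- Python's tuple sort on the collected pairs, rewritten as a single-integer-key sort
lemma sorted2_eq_sorted_key (events : List (String × Int × Int)) (ps : List (Nat × Nat))
    (hmem : ∀ p ∈ ps, p.2 < events.length) :
    PySem.List.sorted2 ps (fun p => p.1) (fun p => p.2) false
      = PySem.List.sorted ps (fun p => p.1 * events.length + p.2) false := by
  rw [PySem.List.sorted_eq_foldl_insertBy]
  show ps.foldl (fun acc x => PySem.List.insertBy
      (fun a b => decide (a.1 < b.1) || (!decide (b.1 < a.1) && decide (a.2 < b.2))) x acc) []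
    = _
  refine foldl_insertBy_congr _ _ ps [] (by simp) ?_
  intro a ha x hx
  have h1 := hmem a ha
  have h2 := hmem x hx
  set n := events.length
  rcases Nat.lt_trichotomy x.1 a.1 with h | h | h
  · have hk : x.1 * n + x.2 < a.1 * n + a.2 := by
      have := Nat.mul_le_mul_right n (show x.1 + 1 ≤ a.1 by omega)
      have h3 : (x.1 + 1) * n = x.1 * n + n := by ring
      omega
    simp [h, hk, Nat.lt_asymm h]
  · simp [h]
  · have hk : ¬ (x.1 * n + x.2 < a.1 * n + a.2) := by
      have := Nat.mul_le_mul_right n (show a.1 + 1 ≤ x.1 by omega)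
      have h3 : (a.1 + 1) * n = a.1 * n + n := by ring
      omega
    simp [h, hk, Nat.lt_asymm h]

lemma compute_overlaps_alt_eq (events : List (String × Int × Int)) :
    compute_overlaps_alt events = (lexOverlaps events).map (outMap events) := by
  obtain ⟨hmem, hnd⟩ := sweep_result events
  unfold compute_overlaps_alt
  simp only
  rw [sorted2_eq_sorted_key events _ (fun p hp => ((hmem p).1 hp).2.2.1)]
  have hperm2 : (lexOverlaps events).Perm
      (((PySem.List.sorted (List.range events.length)
        (fun i => (evGet events i).2.1) false).foldl (sweepStep events) ([], [])).2) := by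
    refine (List.perm_ext_iff_of_nodup (nodup_lexOverlaps events) hnd).2 ?_
    intro p
    rw [mem_lexOverlaps, hmem]
    constructor
    · rintro ⟨h1, h2, h3⟩; exact ⟨h1, by omega, h2, h3⟩
    · rintro ⟨h1, h2, h3, h4⟩; exact ⟨h1, h3, h4⟩
  rw [PySem.List.sorted_eq_of_perm_of_pairwise_lt _ (lexOverlaps events) _ hperm2
    (pairwise_lexOverlaps events)]
  rfl

-- ===== VERDICT (by name: the statement is the Claim_ definition above) =====
theorem compute_overlaps_spec : Claim_equal_compute_overlaps := by
  intro events _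
  unfold Spec_compute_overlaps
  rw [compute_overlaps_eq, compute_overlaps_alt_eq]
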